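-- pv_equiv track=rewrite | github.com/jdh9232/jdh_leetcode | 838-push-dominoes/fullcode.py | leftside
-- ===== SOURCE A (Python) =====
-- def leftside(minostr: str):
--     mino: List[str] = list(minostr)
--     break_down = False
--     for i in range(len(mino) - 1, -1, -1):
--         if mino[i] == "L":
--             break_down = True
--             continue
--         if mino[i] == "R":
--             break_down = False
--             continue
--         # mino [i] == "."
--         if break_down is True:
--             mino[i] = 'L'
--     return "".join(mino)
-- ===== SOURCE B (Python) =====
-- def leftside(minostr: str):
--     out = []
--     buf = []  # run of characters that are neither 'L' nor 'R', waiting for a right boundary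
--     for c in minostr:
--         if c == "L":
--             out.extend("L" * len(buf))
--             out.append("L")
--             buf = []
--         elif c == "R":
--             out.extend(buf)
--             out.append("R")
--             buf = []
--         else:
--             buf.append(c)
--     out.extend(buf)
--     return "".join(out)
-- ===== Notes on version B (the rewrite author's own statement) =====
-- stated objective: alternative
-- what changed: A scans the string right-to-left carrying a break_down flag and mutates cells in place; B scans left-to-right accumulating a buffer of non-L/R characters and flushes the whole run at its right boundary ('L' turns the run into L's, 'R' or end of string leaves it unchanged).
import Mathlib
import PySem

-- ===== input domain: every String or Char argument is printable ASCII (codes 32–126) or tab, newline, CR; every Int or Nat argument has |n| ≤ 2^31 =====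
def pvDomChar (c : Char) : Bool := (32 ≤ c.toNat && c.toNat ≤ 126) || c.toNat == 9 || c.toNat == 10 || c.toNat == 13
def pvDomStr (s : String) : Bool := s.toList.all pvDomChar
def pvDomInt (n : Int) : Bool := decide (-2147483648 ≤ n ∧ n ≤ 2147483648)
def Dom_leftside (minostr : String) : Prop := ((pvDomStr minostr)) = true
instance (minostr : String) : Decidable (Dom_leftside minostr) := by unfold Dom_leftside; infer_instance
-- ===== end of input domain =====

-- B replaces A's right-to-left mutating scan with a left-to-right scan that buffers each
-- run of non-'L'/'R' characters and flushes it at its right boundary (objective: alternative).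

-- ===== PORT A =====
-- A iterates i from len-1 down to 0 carrying break_down, rewriting '.'-cells to 'L'.
-- Ported as the obvious right-to-left structural recursion over the SAME state:
-- goA returns (processed list, break_down flag after reaching the left end of the list).
def goA : List Char → List Char × Bool
  | [] => ([], false)
  | c :: rest =>
    let (rest', flag) := goA rest
    if c = 'L' then ('L' :: rest', true)
    else if c = 'R' then ('R' :: rest', false)
    else if flag then ('L' :: rest', flag)
    else (c :: rest', flag)

def leftside (minostr : String) : String := String.ofList (goA minostr.toList).1

-- ===== PORT B =====
-- goB carries the buffer of pending non-'L'/'R' characters (Source B's buf).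
def goB (buf : List Char) : List Char → List Char
  | [] => buf
  | c :: rest =>
    if c = 'L' then List.replicate buf.length 'L' ++ 'L' :: goB [] rest
    else if c = 'R' then buf ++ 'R' :: goB [] rest
    else goB (buf ++ [c]) rest

def leftside_alt (minostr : String) : String := String.ofList (goB [] minostr.toList)

-- ===== PRECONDITION & SPEC =====
def Spec_leftside (minostr : String) (out : String) : Prop := out = leftside_alt minostr
instance (minostr : String) (out : String) : Decidable (Spec_leftside minostr out) := by unfold Spec_leftside; infer_instance

-- ===== CLAIM (what is proved, stated in full; the proofs are below) =====
def Claim_equal_leftside : Prop := ∀ (minostr : String), Dom_leftside minostr → Spec_leftside minostr (leftside minostr)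

-- ===== LEMMAS AND PROOFS =====
theorem goB_eq_goA (l : List Char) : ∀ buf : List Char,
    goB buf l = (if (goA l).2 then List.replicate buf.length 'L' else buf) ++ (goA l).1 := by
  induction l with
  | nil => intro buf; simp [goA, goB]
  | cons c rest ih =>
    intro buf
    simp only [goA, goB]
    by_cases hL : c = 'L'
    · simp [hL, ih]
    · by_cases hR : c = 'R'
      · simp [hR, ih]
      · by_cases hF : (goA rest).2 = true
        · simp [hL, hR, hF, ih, List.replicate_succ', List.append_assoc]
        · simp [hL, hR, hF, ih]

-- ===== VERDICT (by name: the statement is the Claim_ definition above) =====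
theorem leftside_spec : Claim_equal_leftside := by
  intro s _
  show leftside s = leftside_alt s
  simp [leftside, leftside_alt, goB_eq_goA]
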